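-- pv_equiv track=rewrite | github.com/BiocomputationLab/LAPrepository | LAPEntries/LAP-ColonyCounterSelection-OT2-1.0.0/CounterSelectionScript.py | number_tubes_needed
-- ===== SOURCE A (Python) =====
-- def number_tubes_needed (vol_reactive_per_reaction_factor, number_reactions, vol_max_tube):
-- 	"""
-- 	Given a maximum volume of the tube (vol_max_tube), the volume of that reactive/reaction (vol_reactive_per_reaction_factor) and the total number of reactions (number_reactions)
-- 	this function will return the number of tubes needed for this reactive and how many reactions are filled in every tube
--
-- 	This function does not garantee the lower number of tubes but it assures that everything can be picked with the pipettes that we have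
--
-- 	This function will be used mainly, sometimes exclusively, in setting_number_plates
-- 	"""
--
-- 	number_tubes = 1 # Initizialice the number of tubes
-- 	reactions_per_tube = [number_reactions] # Initialice the reactions per tube
-- 	volumes_tubes = [vol_reactive_per_reaction_factor*number_reactions]*number_tubes # Initialice the number of tubes
--
-- 	while any(volume > vol_max_tube for volume in volumes_tubes): # If there is some volume that is greater than the max volume we are going to enter in the loop
-- 		number_tubes += 1 # We add one tube so the volume can fit in the tubes
--
-- 		# Now we redistribute the reactions (and correspondant volume) to the tubes so it will be the most homogeneus way
-- 		reactions_per_tube = [int(number_reactions/number_tubes)]*number_tubes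
-- 		tubes_to_add_reaction = number_reactions%number_tubes
-- 		for i in range(tubes_to_add_reaction):
-- 			reactions_per_tube[i] += 1
--
-- 		# Calculate the new volumes
-- 		volumes_tubes = [vol_reactive_per_reaction_factor*number_reactions_tube for number_reactions_tube in reactions_per_tube]
--
-- 	# When the volume can fit every tube (exit from th ewhile loop) we return the number of tubes and the reactions that will fit in every tube
-- 	return (number_tubes, reactions_per_tube, volumes_tubes)
-- ===== SOURCE B (Python) =====
-- def number_tubes_needed(vol_reactive_per_reaction_factor, number_reactions, vol_max_tube):
--     """Closed-form version: pick the smallest tube count whose fullest tube still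
--     fits vol_max_tube, then build the reaction and volume lists once."""
--     v, n, m = vol_reactive_per_reaction_factor, number_reactions, vol_max_tube
--     if v > 0 and v * n > m:
--         # fullest tube holds ceil(n/t) reactions; smallest t with v*ceil(n/t) <= m
--         tubes = -(-n // (m // v))
--     else:
--         tubes = 1
--     q, r = divmod(n, tubes)
--     reactions_per_tube = [q + 1] * r + [q] * (tubes - r)
--     return (tubes, reactions_per_tube, [v * x for x in reactions_per_tube])
-- ===== Notes on version B (the rewrite author's own statement) =====
-- stated objective: faster
-- what changed: Replaces the try-every-tube-count loop (which rebuilds the whole distribution per iteration) by a closed-form smallest tube count via ceiling division, building the reaction and volume lists exactly once; Pre_ excludes negative reaction counts that need more than one tube, outside the function's physical domain, where A returns a truncating-division redistribution whose tubes do not even sum to number_reactions.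
-- outside the precondition, e.g. on number_tubes_needed(-2, -5, 3): A returns (3, [0, -1, -1], [0, 2, 2]), B returns (1, [-5], [10])
import Mathlib
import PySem

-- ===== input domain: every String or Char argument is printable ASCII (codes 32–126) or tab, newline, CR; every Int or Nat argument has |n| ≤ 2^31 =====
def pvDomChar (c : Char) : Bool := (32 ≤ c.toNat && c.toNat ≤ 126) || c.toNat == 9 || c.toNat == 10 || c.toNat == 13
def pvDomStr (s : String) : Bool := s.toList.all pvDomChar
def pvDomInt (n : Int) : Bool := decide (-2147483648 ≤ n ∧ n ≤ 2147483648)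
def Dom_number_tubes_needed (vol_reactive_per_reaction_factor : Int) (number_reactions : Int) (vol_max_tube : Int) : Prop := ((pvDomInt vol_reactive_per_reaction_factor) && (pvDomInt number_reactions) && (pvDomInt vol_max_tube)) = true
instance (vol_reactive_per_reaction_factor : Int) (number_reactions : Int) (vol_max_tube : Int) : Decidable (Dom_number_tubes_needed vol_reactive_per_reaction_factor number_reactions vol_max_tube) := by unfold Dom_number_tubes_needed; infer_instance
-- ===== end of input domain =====

-- B replaces A's try-every-tube-count loop by a closed-form smallest tube count
-- (ceiling division) and builds the two lists once; objective: faster.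

-- ===== PORT A =====
-- reactions_per_tube for a given tube count t:
-- [int(n/t)]*t, then +1 on the first n%t tubes.
-- int(n/t) is truncating division; exact as Int.tdiv for |n| ≤ 2^31 (the domain).
def pvRedistribute (n t : Int) : List Int :=
  let q := n.tdiv t
  let r := PySem.Int.mod n t
  (List.range t.toNat).map (fun i => if i < r.toNat then q + 1 else q)

-- the while loop; fuel only makes the recursion total (A diverges outside Pre_)
def pvLoopA (v n m : Int) : Nat → Int → List Int → List Int → Int × List Int × List Int
  | 0, t, rpt, vt => (t, rpt, vt)
  | fuel+1, t, rpt, vt =>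
    if vt.any (fun x => decide (m < x)) then
      let rpt' := pvRedistribute n (t + 1)
      pvLoopA v n m fuel (t + 1) rpt' (rpt'.map (fun x => v * x))
    else (t, rpt, vt)

def number_tubes_needed (vol_reactive_per_reaction_factor : Int) (number_reactions : Int) (vol_max_tube : Int) : Int × List Int × List Int :=
  pvLoopA vol_reactive_per_reaction_factor number_reactions vol_max_tube
    (number_reactions.natAbs + 2) 1 [number_reactions]
    [vol_reactive_per_reaction_factor * number_reactions]

-- ===== PORT B =====
def number_tubes_needed_alt (vol_reactive_per_reaction_factor : Int) (number_reactions : Int) (vol_max_tube : Int) : Int × List Int × List Int :=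
  let v := vol_reactive_per_reaction_factor
  let n := number_reactions
  let m := vol_max_tube
  let t := if 0 < v ∧ m < v * n then -(PySem.Int.floordiv (-n) (PySem.Int.floordiv m v)) else 1
  let q := PySem.Int.floordiv n t
  let r := PySem.Int.mod n t
  let rpt := List.replicate r.toNat (q + 1) ++ List.replicate (t - r).toNat q
  (t, rpt, rpt.map (fun x => v * x))

-- ===== PRECONDITION & SPEC =====
-- Pre_ is A's termination condition restricted to nonnegative reaction counts when
-- more than one tube is needed: outside the first disjunct A's while loop either
-- diverges (m < 0, or 0 < v*n with m < v) or — for a negative number_reactions, a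
-- physically meaningless input — returns a truncating-division redistribution whose
-- tubes do not sum to number_reactions; those inputs are excluded.
def Pre_number_tubes_needed (vol_reactive_per_reaction_factor : Int) (number_reactions : Int) (vol_max_tube : Int) : Prop :=
  vol_reactive_per_reaction_factor * number_reactions ≤ vol_max_tube ∨
    (0 ≤ vol_max_tube ∧ vol_reactive_per_reaction_factor ≤ vol_max_tube ∧ 0 ≤ number_reactions)
instance (vol_reactive_per_reaction_factor : Int) (number_reactions : Int) (vol_max_tube : Int) : Decidable (Pre_number_tubes_needed vol_reactive_per_reaction_factor number_reactions vol_max_tube) := by unfold Pre_number_tubes_needed; infer_instance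

def pvWitness_number_tubes_needed : Int × Int × Int := (3, 10, 7)

def Spec_number_tubes_needed (vol_reactive_per_reaction_factor : Int) (number_reactions : Int) (vol_max_tube : Int) (out : Int × List Int × List Int) : Prop := out = number_tubes_needed_alt vol_reactive_per_reaction_factor number_reactions vol_max_tube
instance (vol_reactive_per_reaction_factor : Int) (number_reactions : Int) (vol_max_tube : Int) (out : Int × List Int × List Int) : Decidable (Spec_number_tubes_needed vol_reactive_per_reaction_factor number_reactions vol_max_tube out) := by unfold Spec_number_tubes_needed; infer_instance

-- ===== CLAIM (what is proved, stated in full; the proofs are below) =====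
def Claim_equal_number_tubes_needed : Prop := ∀ (vol_reactive_per_reaction_factor : Int) (number_reactions : Int) (vol_max_tube : Int), Dom_number_tubes_needed vol_reactive_per_reaction_factor number_reactions vol_max_tube → Pre_number_tubes_needed vol_reactive_per_reaction_factor number_reactions vol_max_tube → Spec_number_tubes_needed vol_reactive_per_reaction_factor number_reactions vol_max_tube (number_tubes_needed vol_reactive_per_reaction_factor number_reactions vol_max_tube)

-- ===== LEMMAS AND PROOFS =====

-- volumes list of A's state for tube count t
def pvVolumes (v n t : Int) : List Int := (pvRedistribute n t).map (fun x => v * x)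

-- "all per-tube volumes fit": the loop's exit condition at tube count t
def pvStop (v n m t : Int) : Prop := ∀ x ∈ pvVolumes v n t, x ≤ m

theorem pvAny_eq_false (m : Int) (l : List Int)
    (h : ∀ x ∈ l, x ≤ m) : (l.any (fun x => decide (m < x))) = false := by
  rw [List.any_eq_false]
  intro x hx
  simpa using h x hx

theorem pvAny_eq_true (m : Int) (l : List Int)
    (h : ¬ ∀ x ∈ l, x ≤ m) : (l.any (fun x => decide (m < x))) = true := by
  rw [List.any_eq_true]
  push_neg at h
  obtain ⟨x, hx, hxm⟩ := h
  exact ⟨x, hx, by simpa using hxm⟩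

theorem pvLoopA_run (v n m : Int) (t0 : Int)
    (hstop : pvStop v n m t0)
    (hmin : ∀ s : Int, 1 ≤ s → s < t0 → ¬ pvStop v n m s) :
    ∀ (fuel : Nat) (t : Int), 1 ≤ t → t ≤ t0 → t0 - t < (fuel : Int) →
      pvLoopA v n m fuel t (pvRedistribute n t) (pvVolumes v n t) =
        (t0, pvRedistribute n t0, pvVolumes v n t0) := by
  intro fuel
  induction fuel with
  | zero => intro t h1 h2 h3; omega
  | succ f ih =>
    intro t h1 h2 h3
    by_cases hts : t = t0
    · subst hts
      unfold pvLoopA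
      rw [pvAny_eq_false m _ hstop, if_neg (by simp)]
    · have hlt : t < t0 := lt_of_le_of_ne h2 hts
      have hns := hmin t h1 hlt
      unfold pvLoopA
      rw [pvAny_eq_true m _ hns, if_pos rfl]
      exact ih (t + 1) (by omega) (by omega) (by push_cast at h3 ⊢; omega)

theorem pvRedistribute_one (n : Int) : pvRedistribute n 1 = [n] := by
  simp [pvRedistribute, Int.tdiv_one]

theorem pvVolumes_one (v n : Int) : pvVolumes v n 1 = [v * n] := by
  simp [pvVolumes, pvRedistribute_one]

theorem pvMapRangeIte (x y : Int) (k t : Nat) (hk : k ≤ t) :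
    (List.range t).map (fun i => if i < k then x else y) =
      List.replicate k x ++ List.replicate (t - k) y := by
  apply List.ext_getElem
  · simp; omega
  · intro i h1 h2
    simp only [List.getElem_map, List.getElem_range]
    by_cases hik : i < k
    · rw [List.getElem_append_left (by simpa using hik)]
      simp [hik]
    · rw [List.getElem_append_right (by simpa using hik)]
      simp [hik]

theorem pvModBounds (n t : Int) (ht : 0 < t) :
    0 ≤ PySem.Int.mod n t ∧ PySem.Int.mod n t < t := by
  rw [PySem.Int.mod_eq_emod_of_pos ht]
  exact ⟨Int.emod_nonneg n (by omega), Int.emod_lt_of_pos n ht⟩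

-- the B-side list construction equals A's redistribute
theorem pvRedistribute_eq_replicate (n t q r : Int) (ht : 0 < t)
    (hq : q = n.tdiv t) (hr : r = PySem.Int.mod n t) :
    pvRedistribute n t = List.replicate r.toNat (q + 1) ++ List.replicate (t - r).toNat q := by
  obtain ⟨hr0, hrt⟩ := pvModBounds n t ht
  subst hq hr
  unfold pvRedistribute
  rw [pvMapRangeIte _ _ _ _ (by omega)]
  congr 2
  omega

-- the stop condition in terms of the two distinct per-tube volumes
theorem pvStop_iff (v n m t : Int) (ht : 0 < t) :
    pvStop v n m t ↔
      ((0 < PySem.Int.mod n t → v * (n.tdiv t + 1) ≤ m) ∧ v * n.tdiv t ≤ m) := by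
  obtain ⟨hr0, hrt⟩ := pvModBounds n t ht
  unfold pvStop pvVolumes
  rw [pvRedistribute_eq_replicate n t _ _ ht rfl rfl]
  simp only [List.map_append, List.map_replicate, List.mem_append, List.mem_replicate]
  constructor
  · intro h
    constructor
    · intro hrpos; exact h _ (Or.inl ⟨by omega, rfl⟩)
    · exact h _ (Or.inr ⟨by omega, rfl⟩)
  · rintro ⟨h1, h2⟩ x (⟨hne, rfl⟩ | ⟨hne, rfl⟩)
    · exact h1 (by omega)
    · exact h2

-- v > 0: v * x ≤ m iff x ≤ m // v
theorem pvFitIff (v m x : Int) (hv : 0 < v) :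
    v * x ≤ m ↔ x ≤ PySem.Int.floordiv m v := by
  rw [PySem.Int.le_floordiv_iff_mul_le hv, mul_comm]

-- stop condition, case v > 0, n > 0: holds iff n ≤ (m//v) * t
theorem pvStop_pos (v n m t : Int) (hv : 0 < v) (hn : 0 < n) (ht : 0 < t) :
    pvStop v n m t ↔ n ≤ PySem.Int.floordiv m v * t := by
  obtain ⟨hr0, hrt⟩ := pvModBounds n t ht
  rw [pvStop_iff v n m t ht]
  rw [pvFitIff v m _ hv, pvFitIff v m _ hv]
  set K := PySem.Int.floordiv m v with hK
  have hq : n.tdiv t = n / t := Int.tdiv_eq_ediv_of_nonneg (by omega)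
  have hm' : PySem.Int.mod n t = n % t := PySem.Int.mod_eq_emod_of_pos ht
  rw [hq, hm']
  rw [hm'] at hr0 hrt
  have hdm : t * (n / t) + n % t = n := Int.ediv_add_emod n t
  set q := n / t with hqdef
  set r := n % t with hrdef
  constructor
  · rintro ⟨h1, h2⟩
    by_cases hr : 0 < r
    · have h3 : q + 1 ≤ K := h1 hr
      nlinarith
    · have hr' : r = 0 := by omega
      nlinarith
  · intro h
    have hqK : q ≤ K := by nlinarith
    refine ⟨fun hr => ?_, hqK⟩
    by_contra hcon
    have : K ≤ q := by omega
    have : K = q := le_antisymm this hqK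
    nlinarith

-- B with the one-tube branch returns (1, [n], [v*n])
theorem pvAlt_one (v n m : Int) (h : ¬ (0 < v ∧ m < v * n)) :
    number_tubes_needed_alt v n m = (1, [n], [v * n]) := by
  simp only [number_tubes_needed_alt, if_neg h, PySem.Int.floordiv_eq_ediv_of_pos one_pos,
    Int.ediv_one, PySem.Int.mod_eq_emod_of_pos one_pos, Int.emod_one]
  simp

-- B with the closed-form branch, written out
theorem pvAlt_pos (v n m t0 : Int) (h : 0 < v ∧ m < v * n)
    (ht : t0 = -(PySem.Int.floordiv (-n) (PySem.Int.floordiv m v))) :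
    number_tubes_needed_alt v n m =
      (t0,
       List.replicate (PySem.Int.mod n t0).toNat (PySem.Int.floordiv n t0 + 1) ++
         List.replicate (t0 - PySem.Int.mod n t0).toNat (PySem.Int.floordiv n t0),
       (List.replicate (PySem.Int.mod n t0).toNat (PySem.Int.floordiv n t0 + 1) ++
         List.replicate (t0 - PySem.Int.mod n t0).toNat (PySem.Int.floordiv n t0)).map
           (fun x => v * x)) := by
  simp only [number_tubes_needed_alt, if_pos h, ← ht]

-- ===== VERDICT (by name: the statement is the Claim_ definition above) =====
theorem number_tubes_needed_spec : Claim_equal_number_tubes_needed := by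
  intro v n m _ hpre
  unfold Spec_number_tubes_needed number_tubes_needed
  by_cases hc : v * n ≤ m
  · -- one tube already fits: the loop exits immediately, B picks t = 1
    have hstop : pvStop v n m 1 := by
      rw [pvStop.eq_def, pvVolumes_one]
      intro x hx
      simp at hx
      omega
    have hrun := pvLoopA_run v n m 1 hstop (by omega) (n.natAbs + 2) 1 le_rfl le_rfl
      (by omega)
    rw [pvRedistribute_one, pvVolumes_one] at hrun
    rw [hrun, pvAlt_one v n m (by push_neg; intro _; omega)]
  · -- more than one tube: from Pre_, 0 ≤ m, v ≤ m, 0 ≤ n; hence v > 0 and n > 0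
    have hm : 0 ≤ m ∧ v ≤ m ∧ 0 ≤ n := by
      rcases hpre with h | h
      · exact absurd h hc
      · exact h
    have hv : 0 < v := by
      by_contra h
      exact hc (by nlinarith [hm.1, hm.2.2])
    have hn : 0 < n := by
      by_contra h
      have hn0 : n = 0 := by omega
      exact hc (by rw [hn0]; simpa using hm.1)
    set K := PySem.Int.floordiv m v with hKdef
    have hK1 : 1 ≤ K := by
      rw [hKdef, PySem.Int.le_floordiv_iff_mul_le hv]; omega
    set t0 := -(PySem.Int.floordiv (-n) K) with ht0def
    have ht0 : (t0 - 1) * K < n ∧ n ≤ t0 * K :=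
      (PySem.Int.neg_floordiv_neg_eq_iff_of_pos (by omega)).mp rfl
    have ht0pos : 0 < t0 := by
      by_contra h
      have h' : t0 ≤ 0 := by omega
      have h2 : t0 * K ≤ 0 * K := mul_le_mul_of_nonneg_right h' (by omega)
      simp at h2
      omega
    have ht0le : t0 ≤ n := by
      have h1 : t0 - 1 ≤ (t0 - 1) * K :=
        le_mul_of_one_le_right (by omega) hK1
      linarith [ht0.1]
    have hstop : pvStop v n m t0 := by
      rw [pvStop_pos v n m t0 hv hn ht0pos, mul_comm]; exact ht0.2
    have hmin : ∀ s : Int, 1 ≤ s → s < t0 → ¬ pvStop v n m s := by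
      intro s h1 h2 hcon
      rw [pvStop_pos v n m s hv hn (by omega)] at hcon
      have h2 : K * s ≤ K * (t0 - 1) :=
        mul_le_mul_of_nonneg_left (by omega) (by omega)
      linarith [ht0.1]
    have hrun := pvLoopA_run v n m t0 hstop hmin (n.natAbs + 2) 1 le_rfl
      (by omega) (by omega)
    rw [pvRedistribute_one, pvVolumes_one] at hrun
    rw [hrun, pvAlt_pos v n m t0 ⟨hv, by omega⟩ (by rw [ht0def, hKdef])]
    have hqeq : PySem.Int.floordiv n t0 = n.tdiv t0 := by
      rw [Int.tdiv_eq_ediv_of_nonneg (by omega), PySem.Int.floordiv_eq_ediv_of_pos ht0pos]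
    simp only [hqeq, ← pvRedistribute_eq_replicate n t0 _ _ ht0pos rfl rfl, pvVolumes]
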